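-- pv_equiv track=rewrite | github.com/KotisKotlyandii/lessons1 | ege22/156.py | f
-- ===== SOURCE A (Python) =====
-- def f(x):
--     a,b = 0,0
--     while x > 0:
--         x //= 9
--         if x % 2 > 0:
--             a += x % 9
--         else:
--             b += 1
--     return a,b
-- ===== SOURCE B (Python) =====
-- def f(x):
--     # Build the list of successive base-9 quotients recursively, then aggregate in two passes.
--     def quots(v):
--         if v <= 0:
--             return []
--         q = v // 9
--         return [q] + quots(q)
--     qs = quots(x)
--     a = sum(q % 9 for q in qs if q % 2 != 0)
--     b = sum(1 for q in qs if q % 2 == 0)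
--     return (a, b)
-- ===== Notes on version B (the rewrite author's own statement) =====
-- stated objective: alternative
-- what changed: A's single interleaved while-loop carrying two accumulators is replaced by recursively materialising the list of successive base-9 quotients and then computing a and b in two separate comprehension passes over that list.
import Mathlib
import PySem

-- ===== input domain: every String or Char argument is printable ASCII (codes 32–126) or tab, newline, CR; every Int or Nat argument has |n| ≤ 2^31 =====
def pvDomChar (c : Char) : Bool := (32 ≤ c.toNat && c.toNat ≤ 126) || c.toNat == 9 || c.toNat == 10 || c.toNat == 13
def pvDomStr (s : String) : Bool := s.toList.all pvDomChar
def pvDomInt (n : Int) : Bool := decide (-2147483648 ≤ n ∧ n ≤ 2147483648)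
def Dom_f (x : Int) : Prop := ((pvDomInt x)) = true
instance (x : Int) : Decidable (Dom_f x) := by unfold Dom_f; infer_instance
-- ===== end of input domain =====

-- B replaces A's interleaved accumulation loop by building the quotient list and aggregating in two passes (objective: alternative, same cost).

-- ===== PORT A =====
theorem pv_fdiv9_lt (x : Int) (hx : 0 < x) :
    (PySem.Int.floordiv x 9).toNat < x.toNat := by
  have h := PySem.Int.floordiv_eq_ediv_of_pos (a := x) (b := 9) (by norm_num)
  omega

def fLoop (x a b : Int) : Int × Int :=
  if hx : 0 < x then
    let x' := PySem.Int.floordiv x 9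
    if PySem.Int.mod x' 2 > 0 then
      fLoop x' (a + PySem.Int.mod x' 9) b
    else
      fLoop x' a (b + 1)
  else (a, b)
termination_by x.toNat
decreasing_by all_goals exact pv_fdiv9_lt x hx

def f (x : Int) : Int × Int := fLoop x 0 0

-- ===== PORT B =====
def quots (v : Int) : List Int :=
  if hv : 0 < v then
    let q := PySem.Int.floordiv v 9
    q :: quots q
  else []
termination_by v.toNat
decreasing_by exact pv_fdiv9_lt v hv

def f_alt (x : Int) : Int × Int :=
  let qs := quots x
  let a := (((qs.filter (fun q => PySem.Int.mod q 2 ≠ 0)).map (fun q => PySem.Int.mod q 9)).sum)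
  let b := (((qs.filter (fun q => PySem.Int.mod q 2 = 0)).length : Int))
  (a, b)

-- ===== PRECONDITION & SPEC =====
def Spec_f (x : Int) (out : Int × Int) : Prop := out = f_alt x
instance (x : Int) (out : Int × Int) : Decidable (Spec_f x out) := by unfold Spec_f; infer_instance

-- ===== CLAIM (what is proved, stated in full; the proofs are below) =====
def Claim_equal_f : Prop := ∀ (x : Int), Dom_f x → Spec_f x (f x)

-- ===== LEMMAS AND PROOFS =====
theorem fLoop_eq : ∀ (n : Nat) (x a b : Int), x.toNat = n →
    fLoop x a b =
      (a + (((quots x).filter (fun q => PySem.Int.mod q 2 ≠ 0)).map (fun q => PySem.Int.mod q 9)).sum,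
       b + (((quots x).filter (fun q => PySem.Int.mod q 2 = 0)).length : Int)) := by
  intro n
  induction n using Nat.strong_induction_on with
  | _ n ih =>
    intro x a b hn
    rw [fLoop, quots]
    by_cases hx : 0 < x
    · simp only [hx, dite_true]
      have hlt : (PySem.Int.floordiv x 9).toNat < n := hn ▸ pv_fdiv9_lt x hx
      have h9 : PySem.Int.floordiv x 9 = x / 9 :=
        PySem.Int.floordiv_eq_ediv_of_pos (by norm_num)
      have hm2 : PySem.Int.mod (x / 9) 2 = (x / 9) % 2 :=
        PySem.Int.mod_eq_emod_of_pos (by norm_num)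
      by_cases hm : PySem.Int.mod (PySem.Int.floordiv x 9) 2 > 0
      · rw [h9] at hm
        have hodd : x / 9 % 2 = 1 := by omega
        have hnd : ¬ (2 ∣ x / 9) := by omega
        rw [if_pos (h9 ▸ hm), ih _ hlt _ (a + PySem.Int.mod (PySem.Int.floordiv x 9) 9) b rfl]
        simp [hodd, hnd]
        ring
      · rw [h9] at hm
        have hodd : ¬ (x / 9 % 2 = 1) := by omega
        have hdv : (2 : Int) ∣ x / 9 := by omega
        rw [if_neg (by rw [h9]; exact hm), ih _ hlt _ a (b + 1) rfl]
        simp [hodd, hdv]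
        ring
    · simp [hx]

theorem f_eq_alt (x : Int) : f x = f_alt x := by
  simp [f, f_alt, fLoop_eq _ x 0 0 rfl]

-- ===== VERDICT (by name: the statement is the Claim_ definition above) =====
theorem f_spec : Claim_equal_f := by
  intro x _
  unfold Spec_f
  exact f_eq_alt x
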